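-- pv_equiv track=rewrite | github.com/Waizor1/Vectra_Backend | bloobcat/routes/remnawave/catcher.py | _has_duplicate_hwid_for_other_owner
-- ===== SOURCE A (Python) =====
-- from typing import Dict, Any, Optional
--
-- def _has_duplicate_hwid_for_other_owner(
--     user_uuid: str,
--     owner_id: int | None,
--     uuid_owner_map: Dict[str, int],
--     hwid_index: Dict[str, set[str]],
-- ) -> bool:
--     for owners in hwid_index.values():
--         if user_uuid not in owners:
--             continue
--         for other_uuid in owners:
--             if other_uuid == user_uuid:
--                 continue
--             if uuid_owner_map.get(other_uuid) != owner_id: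
--                 return True
--     return False
-- ===== SOURCE B (Python) =====
-- def _has_duplicate_hwid_for_other_owner(user_uuid, owner_id, uuid_owner_map, hwid_index):
--     co = set()
--     for owners in hwid_index.values():
--         if user_uuid in owners:
--             co.update(owners)
--     co.discard(user_uuid)
--     if owner_id is None:
--         # a co-user has a different (non-None) owner iff it appears in the map at all
--         return not co.isdisjoint(uuid_owner_map.keys())
--     same_owner = {u for u, o in uuid_owner_map.items() if o == owner_id}
--     return not co.issubset(same_owner)
-- ===== Notes on version B (the rewrite author's own statement) =====
-- stated objective: alternative
-- what changed: Replaces A's interleaved nested scan with per-candidate dict.get checks by set algebra: union all co-HWID groups into one candidate set, then decide the answer by a single set operation - disjointness with the map's key set when owner_id is None, otherwise non-subset of a precomputed same-owner set built once from the map's items.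
import Mathlib
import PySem

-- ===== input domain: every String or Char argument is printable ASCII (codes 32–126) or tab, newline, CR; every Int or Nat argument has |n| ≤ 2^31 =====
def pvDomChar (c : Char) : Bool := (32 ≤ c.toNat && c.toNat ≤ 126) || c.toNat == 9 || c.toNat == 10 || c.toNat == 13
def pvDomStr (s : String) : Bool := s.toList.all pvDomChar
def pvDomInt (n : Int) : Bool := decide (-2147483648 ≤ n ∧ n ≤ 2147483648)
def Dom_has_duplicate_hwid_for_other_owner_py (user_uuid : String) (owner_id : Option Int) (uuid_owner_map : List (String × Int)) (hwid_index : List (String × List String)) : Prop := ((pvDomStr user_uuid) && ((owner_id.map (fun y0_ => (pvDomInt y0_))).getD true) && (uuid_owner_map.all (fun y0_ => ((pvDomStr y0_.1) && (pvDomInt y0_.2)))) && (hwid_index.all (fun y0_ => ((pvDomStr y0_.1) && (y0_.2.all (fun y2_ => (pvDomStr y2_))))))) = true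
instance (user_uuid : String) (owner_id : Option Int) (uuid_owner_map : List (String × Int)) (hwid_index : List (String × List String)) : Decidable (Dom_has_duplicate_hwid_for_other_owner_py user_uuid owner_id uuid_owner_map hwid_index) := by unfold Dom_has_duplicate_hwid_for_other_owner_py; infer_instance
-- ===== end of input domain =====

-- B replaces A's interleaved nested scan with per-candidate dict lookups by set algebra: one pass unions
-- the co-HWID groups into a candidate set, then a single set operation (key-set disjointness, or
-- non-subset of a precomputed same-owner set) decides the answer; same cost, different algorithm.

-- ===== PORT A =====
-- inner 'for other_uuid in owners' loop with its early 'return True'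
def pvAInner (user_uuid : String) (owner_id : Option Int) (uuid_owner_map : List (String × Int)) : List String → Bool
  | [] => false
  | o :: rest =>
    if o == user_uuid then pvAInner user_uuid owner_id uuid_owner_map rest
    else if (PySem.Dict.mk uuid_owner_map).get? o ≠ owner_id then true
    else pvAInner user_uuid owner_id uuid_owner_map rest

-- outer 'for owners in hwid_index.values()' loop
def pvAOuter (user_uuid : String) (owner_id : Option Int) (uuid_owner_map : List (String × Int)) : List (String × List String) → Bool
  | [] => false
  | p :: rest =>
    if ¬ (user_uuid ∈ p.2) then pvAOuter user_uuid owner_id uuid_owner_map rest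
    else if pvAInner user_uuid owner_id uuid_owner_map p.2 then true
    else pvAOuter user_uuid owner_id uuid_owner_map rest

def has_duplicate_hwid_for_other_owner_py (user_uuid : String) (owner_id : Option Int) (uuid_owner_map : List (String × Int)) (hwid_index : List (String × List String)) : Bool :=
  pvAOuter user_uuid owner_id uuid_owner_map hwid_index

-- ===== PORT B =====
def has_duplicate_hwid_for_other_owner_py_alt (user_uuid : String) (owner_id : Option Int) (uuid_owner_map : List (String × Int)) (hwid_index : List (String × List String)) : Bool :=
  -- 'co.update(owners)' loop over hwid_index.values()
  let co0 : PySem.Set String :=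
    hwid_index.foldl
      (fun acc p => if user_uuid ∈ p.2 then PySem.Set.update acc p.2 else acc)
      PySem.Set.empty
  let co := PySem.Set.discard co0 user_uuid
  match owner_id with
  | none => ! PySem.Set.isdisjoint co ((PySem.Dict.mk uuid_owner_map).keys)
  | some w =>
    -- '{u for u, o in uuid_owner_map.items() if o == owner_id}'
    let same : PySem.Set String :=
      PySem.Set.ofList ((((PySem.Dict.mk uuid_owner_map).items.filter (fun p => p.2 == w)).map Prod.fst))
    ! PySem.Set.issubset co same

-- ===== PRECONDITION & SPEC =====
-- Pre_ requires the uuid_owner_map association list to have no duplicate keys: every real Python dict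
-- satisfies this (so at the Python level nothing is excluded); duplicate-key lists represent no dict and
-- their first-match vs items-iteration reading is a model artefact.
def Pre_has_duplicate_hwid_for_other_owner_py (user_uuid : String) (owner_id : Option Int) (uuid_owner_map : List (String × Int)) (hwid_index : List (String × List String)) : Prop :=
  (uuid_owner_map.map Prod.fst).Nodup
instance (user_uuid : String) (owner_id : Option Int) (uuid_owner_map : List (String × Int)) (hwid_index : List (String × List String)) : Decidable (Pre_has_duplicate_hwid_for_other_owner_py user_uuid owner_id uuid_owner_map hwid_index) := by unfold Pre_has_duplicate_hwid_for_other_owner_py; infer_instance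

def pvWitness_has_duplicate_hwid_for_other_owner_py : String × Option Int × (List (String × Int)) × (List (String × List String)) :=
  ("a", some 1, [("b", 2)], [("h", ["a", "b"])])

def Spec_has_duplicate_hwid_for_other_owner_py (user_uuid : String) (owner_id : Option Int) (uuid_owner_map : List (String × Int)) (hwid_index : List (String × List String)) (out : Bool) : Prop := out = has_duplicate_hwid_for_other_owner_py_alt user_uuid owner_id uuid_owner_map hwid_index
instance (user_uuid : String) (owner_id : Option Int) (uuid_owner_map : List (String × Int)) (hwid_index : List (String × List String)) (out : Bool) : Decidable (Spec_has_duplicate_hwid_for_other_owner_py user_uuid owner_id uuid_owner_map hwid_index out) := by unfold Spec_has_duplicate_hwid_for_other_owner_py; infer_instance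

-- ===== CLAIM (what is proved, stated in full; the proofs are below) =====
def Claim_equal_has_duplicate_hwid_for_other_owner_py : Prop := ∀ (user_uuid : String) (owner_id : Option Int) (uuid_owner_map : List (String × Int)) (hwid_index : List (String × List String)), Dom_has_duplicate_hwid_for_other_owner_py user_uuid owner_id uuid_owner_map hwid_index → Pre_has_duplicate_hwid_for_other_owner_py user_uuid owner_id uuid_owner_map hwid_index → Spec_has_duplicate_hwid_for_other_owner_py user_uuid owner_id uuid_owner_map hwid_index (has_duplicate_hwid_for_other_owner_py user_uuid owner_id uuid_owner_map hwid_index)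

-- ===== LEMMAS AND PROOFS =====
lemma pvAInner_eq_any (u : String) (ow : Option Int) (m : List (String × Int)) (l : List String) :
    pvAInner u ow m l = l.any (fun o => decide (o ≠ u ∧ (PySem.Dict.mk m).get? o ≠ ow)) := by
  induction l with
  | nil => rfl
  | cons o rest ih =>
    simp only [pvAInner, List.any_cons, ih]
    by_cases h : o = u
    · simp [h]
    · by_cases h2 : (PySem.Dict.mk m).get? o = ow <;> simp [h, h2]

lemma pvAOuter_eq_any (u : String) (ow : Option Int) (m : List (String × Int)) (l : List (String × List String)) :
    pvAOuter u ow m l = l.any (fun p => decide (u ∈ p.2) && pvAInner u ow m p.2) := by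
  induction l with
  | nil => rfl
  | cons p rest ih =>
    simp only [pvAOuter, List.any_cons, ih]
    by_cases h : u ∈ p.2
    · by_cases h2 : pvAInner u ow m p.2 = true <;> simp [h, h2]
    · simp [h]

lemma pv_mem_fold (u x : String) (l : List (String × List String)) (init : PySem.Set String) :
    x ∈ l.foldl (fun acc p => if u ∈ p.2 then PySem.Set.update acc p.2 else acc) init ↔
      x ∈ init ∨ ∃ p ∈ l, u ∈ p.2 ∧ x ∈ p.2 := by
  induction l generalizing init with
  | nil => simp
  | cons p rest ih =>
    simp only [List.foldl_cons, ih]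
    by_cases h : u ∈ p.2
    · simp only [h, if_pos, PySem.Set.mem_update, List.mem_cons]
      constructor
      · rintro ((h1 | h1) | ⟨q, hq, hu, hx⟩)
        · exact Or.inl h1
        · exact Or.inr ⟨p, Or.inl rfl, h, h1⟩
        · exact Or.inr ⟨q, Or.inr hq, hu, hx⟩
      · rintro (h1 | ⟨q, hq | hq, hu, hx⟩)
        · exact Or.inl (Or.inl h1)
        · exact Or.inl (Or.inr (hq ▸ hx))
        · exact Or.inr ⟨q, hq, hu, hx⟩
    · simp only [h, if_neg, not_false_iff, List.mem_cons]
      constructor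
      · rintro (h1 | ⟨q, hq, hu, hx⟩)
        · exact Or.inl h1
        · exact Or.inr ⟨q, Or.inr hq, hu, hx⟩
      · rintro (h1 | ⟨q, hq | hq, hu, hx⟩)
        · exact Or.inl h1
        · exact absurd (hq ▸ hu) h
        · exact Or.inr ⟨q, hq, hu, hx⟩

-- the decisive per-candidate fact: B's set test at x equals A's 'get(x) != owner_id'
lemma pv_test_eq (ow : Option Int) (m : List (String × Int)) (hnd : (m.map Prod.fst).Nodup) (x : String) :
    (match ow with
     | none => x ∈ (PySem.Dict.mk m).keys
     | some w => x ∉ PySem.Set.ofList (((PySem.Dict.mk m).items.filter (fun p => p.2 == w)).map Prod.fst))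
      ↔ (PySem.Dict.mk m).get? x ≠ ow := by
  have hkeys : (PySem.Dict.mk m).keys.Nodup := by simpa [PySem.Dict.keys] using hnd
  cases ow with
  | none =>
    simp only
    rw [ne_eq, PySem.Dict.get?_eq_none_iff_not_mem_keys, not_not]
  | some w =>
    simp only [PySem.Set.mem_ofList, List.mem_map, List.mem_filter]
    constructor
    · intro h hx
      apply h
      refine ⟨(x, w), ⟨PySem.Dict.mem_items_of_get?_eq_some _ hx, by simp⟩, rfl⟩
    · intro h hx
      rcases hx with ⟨⟨k, v⟩, ⟨hmem, hv⟩, hk⟩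
      simp at hv hk
      subst hk hv
      exact h (by rw [PySem.Dict.get?_of_mem_items _ hmem hkeys])

-- ===== VERDICT (by name: the statement is the Claim_ definition above) =====
theorem has_duplicate_hwid_for_other_owner_py_spec : Claim_equal_has_duplicate_hwid_for_other_owner_py := by
  intro u ow m hi _ hpre
  unfold Spec_has_duplicate_hwid_for_other_owner_py
  unfold has_duplicate_hwid_for_other_owner_py has_duplicate_hwid_for_other_owner_py_alt
  rw [pvAOuter_eq_any, Bool.eq_iff_iff]
  have hA : (hi.any (fun p => decide (u ∈ p.2) && pvAInner u ow m p.2)) = true ↔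
      ∃ x, ((∃ p ∈ hi, u ∈ p.2 ∧ x ∈ p.2) ∧ x ≠ u) ∧ (PySem.Dict.mk m).get? x ≠ ow := by
    simp only [List.any_eq_true, pvAInner_eq_any, Bool.and_eq_true, decide_eq_true_eq]
    constructor
    · rintro ⟨p, hp, hu, x, hx, hne, hget⟩
      exact ⟨x, ⟨⟨p, hp, hu, hx⟩, hne⟩, hget⟩
    · rintro ⟨x, ⟨⟨p, hp, hu, hx⟩, hne⟩, hget⟩
      exact ⟨p, hp, hu, x, hx, hne, hget⟩
  rw [hA]
  have hco : ∀ x, x ∈ PySem.Set.discard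
      (hi.foldl (fun acc p => if u ∈ p.2 then PySem.Set.update acc p.2 else acc) PySem.Set.empty) u
      ↔ (∃ p ∈ hi, u ∈ p.2 ∧ x ∈ p.2) ∧ x ≠ u := by
    intro x
    rw [PySem.Set.mem_discard, pv_mem_fold]
    simp [PySem.Set.empty]
  cases ow with
  | none =>
    simp only [Bool.not_eq_true', ← Bool.not_eq_true, PySem.Set.isdisjoint_iff]
    push Not
    constructor
    · rintro ⟨x, hmem, hget⟩
      exact ⟨x, (hco x).2 hmem, (pv_test_eq none m hpre x).2 hget⟩
    · rintro ⟨x, hmem, hk⟩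
      exact ⟨x, (hco x).1 hmem, (pv_test_eq none m hpre x).1 hk⟩
  | some w =>
    simp only [Bool.not_eq_true', ← Bool.not_eq_true, PySem.Set.issubset_iff]
    push Not
    constructor
    · rintro ⟨x, hmem, hget⟩
      exact ⟨x, (hco x).2 hmem, (pv_test_eq (some w) m hpre x).2 hget⟩
    · rintro ⟨x, hmem, hk⟩
      exact ⟨x, (hco x).1 hmem, (pv_test_eq (some w) m hpre x).1 hk⟩
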